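-- pv_equiv track=rewrite | github.com/SUMIT-JADHAV-23/Hacker-earth-problem | CellMatrix.py | perform_tasks
-- ===== SOURCE A (Python) =====
-- def perform_tasks(N, K, tasks):
--  matrix = [[0] * N for _ in range(N)]
--  result = []
--
--  for task in tasks:
--   i, j = task
--   for x in range(N):
--    matrix[i - 1][x] += 1  # Mark cells in the i-th row
--    matrix[x][j - 1] += 1  # Mark cells in the j-th column
--
--   empty_cells = sum(row.count(0) for row in matrix)
--   result.append(empty_cells)
--
--  return result
-- ===== SOURCE B (Python) =====
-- def perform_tasks(N, K, tasks):
--     unmarked_rows = set(range(1, N + 1))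
--     unmarked_cols = set(range(1, N + 1))
--     result = []
--     for i, j in tasks:
--         unmarked_rows.discard(i)
--         unmarked_cols.discard(j)
--         result.append(len(unmarked_rows) * len(unmarked_cols))
--     return result
-- ===== Notes on version B (the rewrite author's own statement) =====
-- stated objective: faster
-- what changed: B replaces the N x N matrix that A re-marks and fully rescans after every task by two shrinking sets of still-unmarked row/column labels, answering each task as len(unmarked_rows)*len(unmarked_cols) in O(1); Pre_ restricts task coordinates to the natural 1-based domain [1, N], outside which A raises IndexError or its Python negative-index wraparound marks an arbitrary real row/column while B ignores the nonexistent label.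
-- outside the precondition, e.g. on perform_tasks(2, 1, [(0, 1)]): A returns [1], B returns [2]; on perform_tasks(3, 2, [(-1, 2), (1, 1)]): A returns [4, 1], B returns [6, 2]
import Mathlib
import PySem

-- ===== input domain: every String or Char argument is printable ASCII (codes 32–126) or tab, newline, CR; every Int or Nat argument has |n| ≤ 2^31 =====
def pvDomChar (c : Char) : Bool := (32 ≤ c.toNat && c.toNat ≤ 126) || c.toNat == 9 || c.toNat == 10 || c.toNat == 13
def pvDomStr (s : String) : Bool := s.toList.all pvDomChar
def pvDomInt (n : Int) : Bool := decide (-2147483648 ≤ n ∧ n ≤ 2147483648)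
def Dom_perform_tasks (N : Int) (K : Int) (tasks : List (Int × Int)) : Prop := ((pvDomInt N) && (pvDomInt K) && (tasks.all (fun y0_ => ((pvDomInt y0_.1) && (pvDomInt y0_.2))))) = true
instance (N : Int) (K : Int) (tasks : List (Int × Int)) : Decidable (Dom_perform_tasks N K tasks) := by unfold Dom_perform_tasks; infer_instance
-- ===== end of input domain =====

-- B replaces A's O(K*N^2) matrix re-marking and rescanning by two shrinking sets of still-unmarked
-- row/column labels, answering each task as len(rows)*len(cols); return values proved equal on Pre_.

-- ===== PORT A =====
-- matrix[k] / row[k] with Python's negative-index wraparound; exact for in-range k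
-- (Pre_perform_tasks excludes the inputs where Python raises IndexError).
def pvIdx (len : Nat) (k : Int) : Nat := (k.emod len).toNat
-- row[c] += 1
def pvBump (row : List Int) (c : Nat) : List Int := row.set c (row.getD c 0 + 1)
-- the inner 'for x in range(N)' loop of A: mark row i-1 and column j-1
def pvMark (n : Nat) (i j : Int) (m : List (List Int)) : List (List Int) :=
  (List.range n).foldl (fun m x =>
    let m := m.set (pvIdx n (i - 1)) (pvBump (m.getD (pvIdx n (i - 1)) []) x)
    m.set x (pvBump (m.getD x []) (pvIdx n (j - 1)))) m
-- sum(row.count(0) for row in matrix)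
def pvZeros (m : List (List Int)) : Int := (m.map (fun row => (row.count 0 : Int))).sum
def perform_tasks (N : Int) (K : Int) (tasks : List (Int × Int)) : List Int :=
  (tasks.foldl (fun (st : List (List Int) × List Int) t =>
      let m := pvMark N.toNat t.1 t.2 st.1
      (m, st.2 ++ [pvZeros m]))
    (List.replicate N.toNat (List.replicate N.toNat 0), [])).2

-- ===== PORT B =====
-- state: (unmarked_rows, unmarked_cols, result); sets built by Set.ofList/discard
def perform_tasks_alt (N : Int) (K : Int) (tasks : List (Int × Int)) : List Int :=
  (tasks.foldl (fun (st : PySem.Set Int × PySem.Set Int × List Int) t =>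
      let ur := PySem.Set.discard st.1 t.1
      let uc := PySem.Set.discard st.2.1 t.2
      (ur, uc, st.2.2 ++ [PySem.Set.len ur * PySem.Set.len uc]))
    (PySem.Set.ofList (PySem.List.pyRange 1 (N + 1)),
     PySem.Set.ofList (PySem.List.pyRange 1 (N + 1)), [])).2.2

-- ===== PRECONDITION & SPEC =====
-- Pre_ restricts task coordinates to the task's natural 1-based domain [1, N] (for N > 0):
-- outside it A either raises IndexError or, on non-positive coordinates, returns counts after
-- Python's negative-index wraparound has marked an arbitrary real row/column — a value on
-- invalid input as accidental as any other — while B ignores the nonexistent label.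
def Pre_perform_tasks (N : Int) (K : Int) (tasks : List (Int × Int)) : Prop :=
  0 < N → ∀ t ∈ tasks, 1 ≤ t.1 ∧ t.1 ≤ N ∧ 1 ≤ t.2 ∧ t.2 ≤ N
instance (N : Int) (K : Int) (tasks : List (Int × Int)) : Decidable (Pre_perform_tasks N K tasks) := by unfold Pre_perform_tasks; infer_instance
def pvWitness_perform_tasks : Int × Int × (List (Int × Int)) := (2, 2, [(1, 2), (2, 1)])
def Spec_perform_tasks (N : Int) (K : Int) (tasks : List (Int × Int)) (out : List Int) : Prop := out = perform_tasks_alt N K tasks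
instance (N : Int) (K : Int) (tasks : List (Int × Int)) (out : List Int) : Decidable (Spec_perform_tasks N K tasks out) := by unfold Spec_perform_tasks; infer_instance
-- ===== CLAIM (what is proved, stated in full; the proofs are below) =====
def Claim_equal_perform_tasks : Prop := ∀ (N : Int) (K : Int) (tasks : List (Int × Int)), Dom_perform_tasks N K tasks → Pre_perform_tasks N K tasks → Spec_perform_tasks N K tasks (perform_tasks N K tasks)
-- ===== LEMMAS AND PROOFS =====

-- an n×n matrix given by an entry function
def pvMat (n : Nat) (g : Nat → Nat → Int) : List (List Int) :=
  (List.range n).map (fun r => (List.range n).map (g r))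

-- row residue / column residue of a task, as the Nat index A actually touches
def pvNR (n : Nat) (t : Int × Int) : Nat := pvIdx n (t.1 - 1)
def pvNC (n : Nat) (t : Int × Int) : Nat := pvIdx n (t.2 - 1)

-- the matrix A holds after processing prefix p
def pvMk (n : Nat) (p : List (Int × Int)) : List (List Int) :=
  pvMat n (fun r c => (p.countP (fun t => pvNR n t = r) : Int) + (p.countP (fun t => pvNC n t = c) : Int))

lemma pvMat_congr (n : Nat) (g g' : Nat → Nat → Int)
    (h : ∀ r < n, ∀ c < n, g r c = g' r c) : pvMat n g = pvMat n g' := by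
  unfold pvMat
  refine List.map_congr_left (fun r hr => ?_)
  refine List.map_congr_left (fun c hc => ?_)
  exact h r (List.mem_range.mp hr) c (List.mem_range.mp hc)

lemma set_map_range {α : Type} (n i : Nat) (f f' : Nat → α) (v : α)
    (h1 : f' i = v) (h2 : ∀ j, j ≠ i → f' j = f j) :
    ((List.range n).map f).set i v = (List.range n).map f' := by
  apply List.ext_getElem
  · simp
  · intro m hm hm'
    simp only [List.getElem_set, List.getElem_map, List.getElem_range]
    split
    · rename_i he; subst he; exact h1.symm
    · rename_i he; exact (h2 m (fun hme => he hme.symm)).symm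

lemma getD_map_range {α : Type} (n r : Nat) (hr : r < n) (f : Nat → α) (d : α) :
    ((List.range n).map f).getD r d = f r := by
  rw [List.getD_eq_getElem?_getD]
  simp [hr]

lemma pvIdx_lt (n : Nat) (k : Int) (hn : 0 < n) : pvIdx n k < n := by
  unfold pvIdx
  have h1 : 0 ≤ k.emod n := Int.emod_nonneg k (by exact_mod_cast hn.ne')
  have h2 : k.emod n < (n : Int) := Int.emod_lt_of_pos k (by exact_mod_cast hn)
  omega

-- A's inner loop body applied over x ∈ range k, on a matrix in pvMat form
lemma pvMark_fold (n R C : Nat) (hR : R < n) (hC : C < n) (g : Nat → Nat → Int) :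
    ∀ k, k ≤ n →
    (List.range k).foldl (fun m x =>
        let m := m.set R (pvBump (m.getD R []) x)
        m.set x (pvBump (m.getD x []) C)) (pvMat n g) =
      pvMat n (fun r c => g r c + (if r = R ∧ c < k then 1 else 0)
                                + (if c = C ∧ r < k then 1 else 0)) := by
  intro k
  induction k with
  | zero =>
    intro _
    simp only [List.range_zero, List.foldl_nil]
    exact pvMat_congr _ _ _ (fun r _ c _ => by simp)
  | succ k ih =>
    intro hk
    rw [List.range_succ, List.foldl_append, ih (by omega), List.foldl_cons, List.foldl_nil]
    simp only
    set gk : Nat → Nat → Int := fun r c => g r c + (if r = R ∧ c < k then 1 else 0)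
                                + (if c = C ∧ r < k then 1 else 0) with hgk
    have hkn : k < n := by omega
    have hrow : pvBump ((pvMat n gk).getD R []) k =
        (List.range n).map (fun c => if c = k then gk R k + 1 else gk R c) := by
      unfold pvMat pvBump
      rw [getD_map_range n R hR, getD_map_range n k hkn]
      exact set_map_range n k _ _ _ (by simp) (fun j hj => by simp [hj])
    have hm1 : (pvMat n gk).set R (pvBump ((pvMat n gk).getD R []) k) =
        pvMat n (fun r c => gk r c + (if r = R ∧ c = k then 1 else 0)) := by
      rw [hrow]
      unfold pvMat
      refine set_map_range n R _ _ _ ?_ ?_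
      · refine List.map_congr_left (fun c _ => ?_)
        by_cases hck : c = k <;> simp [hck]
      · intro j hj
        refine List.map_congr_left (fun c _ => ?_)
        simp [hj]
    rw [hm1]
    set g1 : Nat → Nat → Int := fun r c => gk r c + (if r = R ∧ c = k then 1 else 0) with hg1
    have hrow2 : pvBump ((pvMat n g1).getD k []) C =
        (List.range n).map (fun c => if c = C then g1 k C + 1 else g1 k c) := by
      unfold pvMat pvBump
      rw [getD_map_range n k hkn, getD_map_range n C hC]
      exact set_map_range n C _ _ _ (by simp) (fun j hj => by simp [hj])
    have hm2 : (pvMat n g1).set k (pvBump ((pvMat n g1).getD k []) C) =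
        pvMat n (fun r c => g1 r c + (if r = k ∧ c = C then 1 else 0)) := by
      rw [hrow2]
      unfold pvMat
      refine set_map_range n k _ _ _ ?_ ?_
      · refine List.map_congr_left (fun c _ => ?_)
        by_cases hcc : c = C <;> simp [hcc]
      · intro j hj
        refine List.map_congr_left (fun c _ => ?_)
        simp [hj]
    rw [hm2]
    refine pvMat_congr _ _ _ (fun r hr c hc => ?_)
    simp only [hg1, hgk]
    split_ifs <;> omega

lemma pvMark_Mk (n : Nat) (hn : 0 < n) (p : List (Int × Int)) (t : Int × Int) :
    pvMark n t.1 t.2 (pvMk n p) = pvMk n (p ++ [t]) := by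
  unfold pvMark pvMk
  rw [pvMark_fold n (pvIdx n (t.1 - 1)) (pvIdx n (t.2 - 1))
        (pvIdx_lt n _ hn) (pvIdx_lt n _ hn) _ n (le_refl n)]
  refine pvMat_congr _ _ _ (fun r hr c hc => ?_)
  rw [List.countP_append, List.countP_append]
  simp only [List.countP_cons, List.countP_nil, pvNR, pvNC, decide_eq_true_eq]
  push_cast
  split_ifs <;> omega

lemma count_zero_map_range (n : Nat) (f : Nat → Int) :
    ((List.range n).map f).count 0 = (List.range n).countP (fun c => f c = 0) := by
  rw [List.count_eq_countP, List.countP_map]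
  refine List.countP_congr (fun c _ => ?_)
  simp only [Function.comp_apply, beq_iff_eq, decide_eq_true_eq]

lemma sum_ite_count (l : List Nat) (q : Nat → Prop) [DecidablePred q] :
    (l.map (fun r => if q r then (1:Int) else 0)).sum = (l.countP (fun r => decide (q r)) : Int) := by
  induction l with
  | nil => simp
  | cons a l ih =>
    simp only [List.map_cons, List.sum_cons, List.countP_cons, ih]
    by_cases h : q a <;> simp [h] <;> omega

-- counting the zero entries of the matrix of a prefix
lemma pvZeros_Mk (n : Nat) (p : List (Int × Int)) :
    pvZeros (pvMk n p) =
      ((List.range n).countP (fun r => p.countP (fun t => pvNR n t = r) = 0) : Int) *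
      ((List.range n).countP (fun c => p.countP (fun t => pvNC n t = c) = 0) : Int) := by
  unfold pvZeros pvMk pvMat
  rw [List.map_map]
  have hrow : ∀ r : Nat,
      (((List.range n).map (fun c => (p.countP (fun t => pvNR n t = r) : Int) + (p.countP (fun t => pvNC n t = c) : Int))).count 0 : Int) =
        if p.countP (fun t => pvNR n t = r) = 0 then
          ((List.range n).countP (fun c => p.countP (fun t => pvNC n t = c) = 0) : Int) else 0 := by
    intro r
    rw [count_zero_map_range]
    by_cases hr : p.countP (fun t => pvNR n t = r) = 0
    · simp only [hr, if_true]
      norm_cast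
      refine List.countP_congr (fun c _ => ?_)
      simp only [decide_eq_true_eq]
      omega
    · simp only [hr, if_false]
      have : (List.range n).countP (fun c => decide ((p.countP (fun t => pvNR n t = r) : Int) + (p.countP (fun t => pvNC n t = c) : Int) = 0)) = 0 := by
        rw [List.countP_eq_zero]
        intro c _
        simp only [decide_eq_true_eq]
        omega
      rw [this]
      norm_num
  have hmap : (List.range n).map ((fun row : List Int => (row.count 0 : Int)) ∘ (fun r => (List.range n).map (fun c => (p.countP (fun t => pvNR n t = r) : Int) + (p.countP (fun t => pvNC n t = c) : Int)))) =
      (List.range n).map (fun r => if p.countP (fun t => pvNR n t = r) = 0 then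
          ((List.range n).countP (fun c => p.countP (fun t => pvNC n t = c) = 0) : Int) else 0) := by
    refine List.map_congr_left (fun r _ => ?_)
    simpa using hrow r
  rw [hmap]
  have hsplit : (List.range n).map (fun r => if p.countP (fun t => pvNR n t = r) = 0 then
      ((List.range n).countP (fun c => p.countP (fun t => pvNC n t = c) = 0) : Int) else 0) =
      (List.range n).map (fun r => ((List.range n).countP (fun c => p.countP (fun t => pvNC n t = c) = 0) : Int) * (if p.countP (fun t => pvNR n t = r) = 0 then (1:Int) else 0)) := by
    refine List.map_congr_left (fun r _ => ?_)
    split_ifs <;> ring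
  rw [hsplit, List.sum_map_mul_left, sum_ite_count]
  ring

-- #{x ∈ s | x ∈ l} = number of distinct elements of l, for s nodup containing every element of l
lemma countP_mem_nodup {α : Type} [DecidableEq α] (s l : List α) (hs : s.Nodup) (h : ∀ a ∈ l, a ∈ s) :
    s.countP (fun r => decide (r ∈ l)) = l.toFinset.card := by
  rw [List.countP_eq_length_filter]
  have hnd : (s.filter (fun r => decide (r ∈ l))).Nodup := hs.filter _
  rw [← List.toFinset_card_of_nodup hnd]
  congr 1
  ext a
  simp only [List.mem_toFinset, List.mem_filter, decide_eq_true_eq]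
  exact ⟨fun ha => ha.2, fun ha => ⟨h a ha, ha⟩⟩

-- the untouched-index count of A's rescan, as n minus the number of distinct marked indices
lemma unmarked_eq (n : Nat) (l : List Nat) (h : ∀ a ∈ l, a < n) :
    ((List.range n).countP (fun r => l.count r = 0) : Int) = (n : Int) - (l.toFinset.card : Int) := by
  have hstep1 : (List.range n).countP (fun r => l.count r = 0) =
      (List.range n).countP (fun r => decide (¬ r ∈ l)) := by
    refine List.countP_congr (fun r _ => ?_)
    simp only [decide_eq_true_eq]
    rw [List.count_eq_zero]
  have hsum : (List.range n).countP (fun r => decide (¬ r ∈ l)) +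
      (List.range n).countP (fun r => decide (r ∈ l)) = n := by
    have h0 := List.length_eq_countP_add_countP (l := List.range n) (p := fun r => decide (r ∈ l))
    have h1 : (List.range n).countP (fun a => ¬ (fun r => decide (r ∈ l)) a = true) =
        (List.range n).countP (fun r => decide (¬ r ∈ l)) := by
      refine List.countP_congr (fun r _ => ?_)
      simp
    rw [h1] at h0
    simp only [List.length_range] at h0
    omega
  rw [hstep1]
  rw [countP_mem_nodup (List.range n) l List.nodup_range (fun a ha => List.mem_range.mpr (h a ha))] at hsum
  omega

-- per-task emitted value of A, in closed form over the Nat indices it touches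
lemma value_eq (n : Nat) (p : List (Int × Int)) (hn : 0 < n) :
    pvZeros (pvMk n p) =
      ((n : Int) - ((p.map (pvNR n)).toFinset.card : Int)) *
      ((n : Int) - ((p.map (pvNC n)).toFinset.card : Int)) := by
  rw [pvZeros_Mk]
  have hR : ∀ r : Nat, p.countP (fun t => pvNR n t = r) = (p.map (pvNR n)).count r := by
    intro r
    rw [List.count_eq_countP, List.countP_map]
    refine List.countP_congr (fun t _ => ?_)
    simp only [Function.comp_apply, beq_iff_eq, decide_eq_true_eq]
  have hC : ∀ c : Nat, p.countP (fun t => pvNC n t = c) = (p.map (pvNC n)).count c := by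
    intro c
    rw [List.count_eq_countP, List.countP_map]
    refine List.countP_congr (fun t _ => ?_)
    simp only [Function.comp_apply, beq_iff_eq, decide_eq_true_eq]
  have e1 : (List.range n).countP (fun r => p.countP (fun t => pvNR n t = r) = 0) =
      (List.range n).countP (fun r => (p.map (pvNR n)).count r = 0) := by
    refine List.countP_congr (fun r _ => ?_)
    simp only [decide_eq_true_eq, hR r]
  have e2 : (List.range n).countP (fun c => p.countP (fun t => pvNC n t = c) = 0) =
      (List.range n).countP (fun c => (p.map (pvNC n)).count c = 0) := by
    refine List.countP_congr (fun c _ => ?_)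
    simp only [decide_eq_true_eq, hC c]
  rw [e1, e2,
      unmarked_eq n _ (by intro a ha; obtain ⟨t, _, ht⟩ := List.mem_map.mp ha; rw [← ht]; exact pvIdx_lt n _ hn),
      unmarked_eq n _ (by intro a ha; obtain ⟨t, _, ht⟩ := List.mem_map.mp ha; rw [← ht]; exact pvIdx_lt n _ hn)]

lemma toFinset_map' (l : List Int) (f : Int → Nat) : (l.map f).toFinset = l.toFinset.image f := by
  ext a; simp

-- for 1-based labels in [1, N] the touched Nat indices are in bijection with the labels
lemma card_lbl (N : Int) (hN : 0 < N) (l : List Int) (hl : ∀ x ∈ l, 1 ≤ x ∧ x ≤ N) :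
    ((l.map (fun x => pvIdx N.toNat (x - 1))).toFinset.card) = l.toFinset.card := by
  have hmap : l.map (fun x => pvIdx N.toNat (x - 1)) = l.map (fun x => (x - 1).toNat) := by
    refine List.map_congr_left (fun x hx => ?_)
    obtain ⟨h1, h2⟩ := hl x hx
    unfold pvIdx
    have : (x - 1).emod N.toNat = x - 1 := Int.emod_eq_of_lt (by omega) (by omega)
    rw [this]
  rw [hmap, toFinset_map']
  refine Finset.card_image_of_injOn ?_
  intro a ha b hb hab
  simp only [List.coe_toFinset, Set.mem_setOf_eq] at ha hb
  dsimp only at hab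
  obtain ⟨ha1, _⟩ := hl a ha
  obtain ⟨hb1, _⟩ := hl b hb
  omega

-- B's unmarked count after the labels in l have been discarded
lemma len_filter (N : Int) (hN : 0 < N) (l : List Int) (hl : ∀ x ∈ l, 1 ≤ x ∧ x ≤ N) :
    (((PySem.List.pyRange 1 (N + 1)).filter (fun y => decide (y ∉ l))).length : Int) =
      N - (l.toFinset.card : Int) := by
  rw [← List.countP_eq_length_filter]
  have hsum : (PySem.List.pyRange 1 (N + 1)).countP (fun y => decide (y ∉ l)) +
      (PySem.List.pyRange 1 (N + 1)).countP (fun y => decide (y ∈ l)) =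
        (PySem.List.pyRange 1 (N + 1)).length := by
    have h0 := List.length_eq_countP_add_countP (l := PySem.List.pyRange 1 (N + 1))
      (p := fun y => decide (y ∈ l))
    have h1 : (PySem.List.pyRange 1 (N + 1)).countP (fun a => ¬ (fun y => decide (y ∈ l)) a = true) =
        (PySem.List.pyRange 1 (N + 1)).countP (fun y => decide (y ∉ l)) := by
      refine List.countP_congr (fun y _ => ?_)
      simp
    rw [h1] at h0
    omega
  rw [countP_mem_nodup (PySem.List.pyRange 1 (N + 1)) l (PySem.List.nodup_pyRange_one 1 (N + 1))
      (fun a ha => PySem.List.mem_pyRange_one.mpr ⟨(hl a ha).1, by have := (hl a ha).2; omega⟩)] at hsum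
  rw [PySem.List.length_pyRange_one] at hsum
  omega

-- the two loops agree, step by step, on in-range 1-based tasks
lemma loop_eq (N : Int) (hN : 0 < N) :
    ∀ (rest p : List (Int × Int)) (acc : List Int),
    (∀ t ∈ rest, 1 ≤ t.1 ∧ t.1 ≤ N ∧ 1 ≤ t.2 ∧ t.2 ≤ N) →
    (∀ t ∈ p, 1 ≤ t.1 ∧ t.1 ≤ N ∧ 1 ≤ t.2 ∧ t.2 ≤ N) →
    (rest.foldl (fun (st : List (List Int) × List Int) t =>
        let m := pvMark N.toNat t.1 t.2 st.1
        (m, st.2 ++ [pvZeros m])) (pvMk N.toNat p, acc)).2 =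
    (rest.foldl (fun (st : PySem.Set Int × PySem.Set Int × List Int) t =>
        let ur := PySem.Set.discard st.1 t.1
        let uc := PySem.Set.discard st.2.1 t.2
        (ur, uc, st.2.2 ++ [PySem.Set.len ur * PySem.Set.len uc]))
      ((PySem.List.pyRange 1 (N + 1)).filter (fun y => decide (y ∉ p.map Prod.fst)),
       (PySem.List.pyRange 1 (N + 1)).filter (fun y => decide (y ∉ p.map Prod.snd)),
       acc)).2.2 := by
  intro rest
  induction rest with
  | nil => intro p acc _ _; rfl
  | cons t rest ih =>
    intro p acc hall hp
    have hn : 0 < N.toNat := by omega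
    have hNn : ((N.toNat : Nat) : Int) = N := by omega
    obtain ⟨ht1, ht2, ht3, ht4⟩ := hall t (by simp)
    have hp' : ∀ s ∈ p ++ [t], 1 ≤ s.1 ∧ s.1 ≤ N ∧ 1 ≤ s.2 ∧ s.2 ≤ N := by
      intro s hs
      rcases List.mem_append.mp hs with h | h
      · exact hp s h
      · rw [List.mem_singleton.mp h]; exact ⟨ht1, ht2, ht3, ht4⟩
    simp only [List.foldl_cons]
    rw [pvMark_Mk N.toNat hn p t]
    have hdis : ∀ (f : Int × Int → Int),
        PySem.Set.discard ((PySem.List.pyRange 1 (N + 1)).filter (fun y => decide (y ∉ p.map f))) (f t) =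
          (PySem.List.pyRange 1 (N + 1)).filter (fun y => decide (y ∉ (p ++ [t]).map f)) := by
      intro f
      show List.filter _ _ = _
      rw [List.filter_filter]
      refine List.filter_congr (fun y _ => ?_)
      by_cases h1 : y = f t <;> by_cases h2 : y ∈ p.map f <;> simp [h1, h2]
    have hvr := len_filter N hN ((p ++ [t]).map Prod.fst)
      (by intro x hx; obtain ⟨s, hs, hsx⟩ := List.mem_map.mp hx; have := hp' s hs; omega)
    have hvc := len_filter N hN ((p ++ [t]).map Prod.snd)
      (by intro x hx; obtain ⟨s, hs, hsx⟩ := List.mem_map.mp hx; have := hp' s hs; omega)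
    have hval : pvZeros (pvMk N.toNat (p ++ [t])) =
        ((((PySem.List.pyRange 1 (N + 1)).filter (fun y => decide (y ∉ (p ++ [t]).map Prod.fst))).length : Int)) *
        ((((PySem.List.pyRange 1 (N + 1)).filter (fun y => decide (y ∉ (p ++ [t]).map Prod.snd))).length : Int)) := by
      rw [value_eq N.toNat (p ++ [t]) hn, hvr, hvc, hNn]
      have em : ∀ (f : Int × Int → Int) (g : Int × Int → Nat), (∀ s, g s = pvIdx N.toNat (f s - 1)) →
          (p ++ [t]).map g = ((p ++ [t]).map f).map (fun x => pvIdx N.toNat (x - 1)) := by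
        intro f g hg
        rw [List.map_map]
        exact List.map_congr_left (fun s _ => hg s)
      rw [em Prod.fst (pvNR N.toNat) (fun s => rfl), em Prod.snd (pvNC N.toNat) (fun s => rfl),
          card_lbl N hN ((p ++ [t]).map Prod.fst)
            (by intro x hx; obtain ⟨s, hs, hsx⟩ := List.mem_map.mp hx; have := hp' s hs; omega),
          card_lbl N hN ((p ++ [t]).map Prod.snd)
            (by intro x hx; obtain ⟨s, hs, hsx⟩ := List.mem_map.mp hx; have := hp' s hs; omega)]
    simp only [hdis Prod.fst, hdis Prod.snd, PySem.Set.len]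
    rw [← hval]
    exact ih (p ++ [t]) _ (fun s hs => hall s (by simp [hs])) hp'

-- degenerate side: with N ≤ 0 the matrix is empty and every emitted count of A is 0
lemma loopA_empty (N : Int) (hN : N ≤ 0) :
    ∀ (rest : List (Int × Int)) (acc : List Int),
    (rest.foldl (fun (st : List (List Int) × List Int) t =>
        let m := pvMark N.toNat t.1 t.2 st.1
        (m, st.2 ++ [pvZeros m])) ([], acc)).2 = acc ++ rest.map (fun _ => (0:Int)) := by
  have hn : N.toNat = 0 := by omega
  intro rest
  induction rest with
  | nil => intro acc; simp
  | cons t rest ih =>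
    intro acc
    simp only [List.foldl_cons]
    have hmark : pvMark N.toNat t.1 t.2 ([] : List (List Int)) = [] := by
      rw [hn]; rfl
    rw [hmark]
    have : pvZeros ([] : List (List Int)) = 0 := rfl
    rw [this, ih]
    simp

-- degenerate side: with no labels, B's sets stay empty and every emitted product is 0
lemma loopB_empty :
    ∀ (rest : List (Int × Int)) (acc : List Int),
    (rest.foldl (fun (st : PySem.Set Int × PySem.Set Int × List Int) t =>
        let ur := PySem.Set.discard st.1 t.1
        let uc := PySem.Set.discard st.2.1 t.2
        (ur, uc, st.2.2 ++ [PySem.Set.len ur * PySem.Set.len uc]))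
      (([] : List Int), ([] : List Int), acc)).2.2 = acc ++ rest.map (fun _ => (0:Int)) := by
  intro rest
  induction rest with
  | nil => intro acc; simp
  | cons t rest ih =>
    intro acc
    simp only [List.foldl_cons]
    show (rest.foldl _ (([] : List Int), ([] : List Int), acc ++ [(0:Int) * 0])).2.2 = _
    rw [ih]
    simp

lemma pvMk_nil (n : Nat) : pvMk n [] = List.replicate n (List.replicate n (0:Int)) := by
  unfold pvMk pvMat
  simp [List.map_const']

-- ===== VERDICT (by name: the statements are the Claim_ definitions above) =====
theorem perform_tasks_spec : Claim_equal_perform_tasks := by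
  intro N K tasks _ hpre
  unfold Spec_perform_tasks perform_tasks perform_tasks_alt
  by_cases hN : 0 < N
  · have h := loop_eq N hN tasks [] [] (hpre hN) (by simp)
    rw [pvMk_nil] at h
    rw [PySem.Set.ofList_eq_self_of_nodup _ (PySem.List.nodup_pyRange_one 1 (N + 1))]
    simpa using h
  · have hA := loopA_empty N (by omega) tasks []
    have hrange : PySem.List.pyRange 1 (N + 1) = [] := by
      rw [PySem.List.pyRange_one]
      have : (N + 1 - 1).toNat = 0 := by omega
      rw [this]
      rfl
    have hrepl : List.replicate N.toNat (List.replicate N.toNat (0:Int)) = [] := by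
      have : N.toNat = 0 := by omega
      rw [this]; rfl
    rw [hrepl, hA, hrange]
    show _ = (tasks.foldl _ (([] : List Int), ([] : List Int), ([] : List Int))).2.2
    rw [loopB_empty tasks []]
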